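-- pv_equiv track=rewrite | github.com/SYL4R2k27/xerocode-ai-office | backend/app/services/loop_guard.py | _is_ping_pong
-- ===== SOURCE A (Python) =====
-- def _is_ping_pong(senders: list[str]) -> bool:
--     """Detect A→B→A→B pattern."""
--     if len(senders) < 4:
--         return False
--
--     # Check if it's alternating between exactly 2 agents
--     unique = set(senders)
--     if len(unique) != 2:
--         return False
--
--     # Check alternating pattern
--     for i in range(len(senders) - 2):
--         if senders[i] != senders[i + 2]:
--             return False
--
--     return True
-- ===== SOURCE B (Python) =====
-- def _is_ping_pong(senders: list[str]) -> bool: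
--     """Detect A→B→A→B pattern: split into even/odd position subsequences,
--     each must collapse to one distinct sender and the two must differ."""
--     evens = set(senders[0::2])
--     odds = set(senders[1::2])
--     return len(senders) >= 4 and len(evens) == 1 and len(odds) == 1 and evens != odds
-- ===== Notes on version B (the rewrite author's own statement) =====
-- stated objective: simpler
-- what changed: Instead of building a set of all senders and scanning indices i vs i+2, B partitions the list into the even-index and odd-index subsequences by slicing and checks that each collapses to a singleton set and the two singletons differ.
import Mathlib
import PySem

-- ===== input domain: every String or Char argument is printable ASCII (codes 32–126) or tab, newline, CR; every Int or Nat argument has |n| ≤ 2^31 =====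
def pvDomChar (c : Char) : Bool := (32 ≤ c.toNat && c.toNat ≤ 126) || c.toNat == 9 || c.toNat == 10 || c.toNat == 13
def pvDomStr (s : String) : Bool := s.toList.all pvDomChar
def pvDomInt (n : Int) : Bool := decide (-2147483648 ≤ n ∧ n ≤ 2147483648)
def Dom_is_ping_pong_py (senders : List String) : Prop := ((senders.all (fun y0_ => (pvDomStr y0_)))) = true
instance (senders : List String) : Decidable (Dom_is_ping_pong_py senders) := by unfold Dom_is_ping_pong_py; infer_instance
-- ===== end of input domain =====

-- B replaces A's whole-list set + i/i+2 scan by partitioning the list into the even-index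
-- and odd-index subsequences (extended slices) and checking each collapses to a singleton
-- set, the two singletons differing (objective: simpler).

-- ===== PORT A =====
def is_ping_pong_py (senders : List String) : Bool :=
  if senders.length < 4 then false
  else
    let unique : PySem.Set String := PySem.Set.ofList senders
    if unique.length ≠ 2 then false
    else
      (PySem.List.pyRange 0 ((senders.length : Int) - 2) 1).all
        (fun i => PySem.List.pyGetD senders i "" == PySem.List.pyGetD senders (i + 2) "")

-- ===== PORT B =====
-- senders[0::2] / senders[1::2]: slice? never returns none for step 2, so .getD [] is exact
def is_ping_pong_py_alt (senders : List String) : Bool :=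
  let evens : PySem.Set String := PySem.Set.ofList ((PySem.List.slice? senders (some 0) none 2).getD [])
  let odds : PySem.Set String := PySem.Set.ofList ((PySem.List.slice? senders (some 1) none 2).getD [])
  decide (4 ≤ senders.length) && (PySem.Set.len evens == 1) && (PySem.Set.len odds == 1)
    && !(PySem.Set.equal evens odds)

-- ===== PRECONDITION & SPEC =====
def Spec_is_ping_pong_py (senders : List String) (out : Bool) : Prop := out = is_ping_pong_py_alt senders
instance (senders : List String) (out : Bool) : Decidable (Spec_is_ping_pong_py senders out) := by unfold Spec_is_ping_pong_py; infer_instance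

-- ===== CLAIM (what is proved, stated in full; the proofs are below) =====
def Claim_equal_is_ping_pong_py : Prop := ∀ (senders : List String), Dom_is_ping_pong_py senders → Spec_is_ping_pong_py senders (is_ping_pong_py senders)

-- ===== LEMMAS AND PROOFS =====

-- the even-index subsequence, structurally
def pvEvens {α : Type} : List α → List α
  | [] => []
  | [x] => [x]
  | x :: _ :: t => x :: pvEvens t

lemma filterMap_evens {α : Type} (xs : List α) :
    List.filterMap (fun k => xs[2*k]?) (List.range ((xs.length+1)/2)) = pvEvens xs := by
  induction xs using pvEvens.induct with
  | case1 => simp [pvEvens]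
  | case2 x => simp [pvEvens]
  | case3 x y t ih =>
    have hlen : ((x :: y :: t).length + 1) / 2 = (t.length + 1) / 2 + 1 := by
      simp; omega
    rw [hlen, List.range_succ_eq_map, List.filterMap_cons, List.filterMap_map]
    have hfun : ((fun k => (x :: y :: t)[2 * k]?) ∘ Nat.succ) = (fun k => t[2*k]?) := by
      funext k
      show (x :: y :: t)[2 * (k+1)]? = t[2*k]?
      have h2 : 2 * (k + 1) = (2 * k) + 1 + 1 := by omega
      rw [h2]; simp
    rw [hfun, ih]
    simp [pvEvens]

lemma slice0 (xs : List String) :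
    PySem.List.slice? xs (some 0) none 2 = some (pvEvens xs) := by
  simp only [PySem.List.slice?, PySem.List.sliceIndices]
  norm_num
  have hc : (if 0 < xs.length then (((xs.length:Int) + 2 - 1) / 2).toNat else 0)
      = (xs.length + 1) / 2 := by split <;> omega
  have hf : (fun k : Nat => xs[(2 * (k:Int)).toNat]?) = (fun k : Nat => xs[2*k]?) := by
    funext k; congr 1
  rw [hc, hf, filterMap_evens]

lemma slice1 (xs : List String) :
    PySem.List.slice? xs (some 1) none 2 = some (pvEvens xs.tail) := by
  match xs with
  | [] => rfl
  | x :: t =>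
    simp only [PySem.List.slice?, PySem.List.sliceIndices]
    norm_num
    have hc : (if 0 < t.length then (((t.length:Int) + 2 - 1) / 2).toNat else 0)
        = (t.length + 1) / 2 := by split <;> omega
    have hf : (fun k : Nat => (x :: t)[(1 + 2 * (k:Int)).toNat]?) = (fun k : Nat => t[2*k]?) := by
      funext k
      have h1 : (1 + 2 * (k:Int)).toNat = 2 * k + 1 := by omega
      rw [h1]; simp
    rw [hc, hf, filterMap_evens]

-- membership in the even-index subsequence
lemma mem_pvEvens (xs : List String) (v : String) :
    v ∈ pvEvens xs ↔ ∃ k, 2 * k < xs.length ∧ xs.getD (2 * k) "" = v := by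
  induction xs using pvEvens.induct with
  | case1 => simp [pvEvens]
  | case2 x =>
    simp only [pvEvens, List.mem_singleton, List.length_singleton]
    constructor
    · rintro rfl; exact ⟨0, by omega, rfl⟩
    · rintro ⟨k, hk, rfl⟩
      have : k = 0 := by omega
      subst this; rfl
  | case3 x y t ih =>
    simp only [pvEvens, List.mem_cons, ih, List.length_cons]
    constructor
    · rintro (rfl | ⟨k, hk, rfl⟩)
      · exact ⟨0, by omega, rfl⟩
      · refine ⟨k + 1, by omega, ?_⟩
        have h2 : 2 * (k + 1) = 2 * k + 1 + 1 := by omega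
        rw [h2]; simp [List.getD]
    · rintro ⟨k, hk, rfl⟩
      match k with
      | 0 => exact Or.inl rfl
      | k + 1 =>
        right
        refine ⟨k, by omega, ?_⟩
        have h2 : 2 * (k + 1) = 2 * k + 1 + 1 := by omega
        rw [h2]; simp [List.getD]

-- a nodup list whose membership is exactly {a} is [a]
lemma nodup_mem_singleton (s : List String) (a : String) (hnd : s.Nodup)
    (h : ∀ x, x ∈ s ↔ x = a) : s = [a] := by
  match s with
  | [] => exact absurd ((h a).mpr rfl) (by simp)
  | x :: t =>
    have hx : x = a := (h x).mp (by simp)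
    subst hx
    have ht : t = [] := by
      match t with
      | [] => rfl
      | y :: u =>
        exfalso
        have hy : y = x := (h y).mp (by simp)
        subst hy
        simp at hnd
    rw [ht]

-- singleton-set characterisation
lemma set_one_iff (m : List String) (a : String) (ha : a ∈ m) :
    ((PySem.Set.ofList m).length = 1) ↔ ∀ x ∈ m, x = a := by
  constructor
  · intro h1 x hx
    obtain ⟨c, hc⟩ := List.length_eq_one_iff.mp h1
    have hxc : x = c := by
      have hxm : x ∈ PySem.Set.ofList m := by rw [PySem.Set.mem_ofList]; exact hx
      rw [hc] at hxm; simpa using hxm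
    have hac : a = c := by
      have ham : a ∈ PySem.Set.ofList m := by rw [PySem.Set.mem_ofList]; exact ha
      rw [hc] at ham; simpa using ham
    rw [hxc, hac]
  · intro h
    have : PySem.Set.ofList m = [a] := by
      apply nodup_mem_singleton _ _ (PySem.Set.nodup_ofList m)
      intro x
      rw [PySem.Set.mem_ofList]
      exact ⟨fun hx => h x hx, fun hx => hx ▸ ha⟩
    rw [this]
    rfl

-- A's loop as a Nat-indexed proposition
lemma loopA_iff (l : List String) :
    ((PySem.List.pyRange 0 ((l.length : Int) - 2) 1).all
        (fun i => PySem.List.pyGetD l i "" == PySem.List.pyGetD l (i + 2) "") = true)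
      ↔ (∀ k : Nat, k + 2 < l.length → l.getD k "" = l.getD (k + 2) "") := by
  rw [List.all_eq_true]
  constructor
  · intro h k hk
    have hmem : (k : Int) ∈ PySem.List.pyRange 0 ((l.length : Int) - 2) 1 := by
      rw [PySem.List.mem_pyRange_one]; omega
    have := h _ hmem
    simp only [beq_iff_eq] at this
    have h2 : ((k : Int) + 2) = ((k + 2 : Nat) : Int) := by push_cast; ring
    rwa [h2, PySem.List.pyGetD_natCast, PySem.List.pyGetD_natCast] at this
  · intro h i hmem
    rw [PySem.List.mem_pyRange_one] at hmem
    obtain ⟨h0, h1⟩ := hmem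
    obtain ⟨k, rfl⟩ : ∃ k : Nat, (k : Int) = i := ⟨i.toNat, Int.toNat_of_nonneg h0⟩
    have h2 : ((k : Int) + 2) = ((k + 2 : Nat) : Int) := by push_cast; ring
    simp only [beq_iff_eq]
    rw [h2, PySem.List.pyGetD_natCast, PySem.List.pyGetD_natCast]
    exact h k (by omega)

-- period-2 closure gives the parity characterisation
lemma periodic_parity (l : List String)
    (h : ∀ k : Nat, k + 2 < l.length → l.getD k "" = l.getD (k + 2) "") :
    ∀ k : Nat, k < l.length → l.getD k "" = l.getD (k % 2) "" := by
  intro k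
  induction k using Nat.strong_induction_on with
  | _ k ih =>
    intro hk
    by_cases hlt : k < 2
    · interval_cases k <;> simp
    · obtain ⟨j, rfl⟩ : ∃ j, k = j + 2 := ⟨k - 2, by omega⟩
      have := h j (by omega)
      rw [← this]
      have := ih j (by omega) (by omega)
      rw [this]
      congr 1
      omega

-- a nodup list whose elements are exactly {a, b}, a ≠ b, has length 2
lemma set_card_two (s : List String) (a b : String) (hnd : s.Nodup)
    (ha : a ∈ s) (hb : b ∈ s) (hab : a ≠ b) (hall : ∀ x ∈ s, x = a ∨ x = b) :
    s.length = 2 := by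
  have hfin : s.toFinset = {a, b} := by
    ext x
    simp only [List.mem_toFinset, Finset.mem_insert, Finset.mem_singleton]
    exact ⟨fun hx => hall x hx, fun hx => by rcases hx with rfl | rfl <;> assumption⟩
  have := List.toFinset_card_of_nodup hnd
  rw [hfin] at this
  rw [← this, Finset.card_pair hab]

-- a nodup list whose elements are all a has length ≤ 1
lemma set_card_one (s : List String) (a : String) (hnd : s.Nodup)
    (hall : ∀ x ∈ s, x = a) : s.length ≤ 1 := by
  match s with
  | [] => simp
  | [_] => simp
  | x :: y :: t =>
    exfalso
    have hx := hall x (by simp)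
    have hy := hall y (by simp)
    subst hx
    rw [hy] at hnd
    simp at hnd

-- A, characterised: first two senders differ and every entry equals its parity representative
lemma A_iff (l : List String) (h4 : ¬ l.length < 4) :
    is_ping_pong_py l = true ↔
      (l.getD 0 "" ≠ l.getD 1 "" ∧ ∀ k : Nat, k < l.length → l.getD k "" = l.getD (k % 2) "") := by
  unfold is_ping_pong_py
  simp only [h4, if_false]
  have h0 : 0 < l.length := by omega
  have h1 : 1 < l.length := by omega
  set a := l.getD 0 "" with hadef
  set b := l.getD 1 "" with hbdef
  constructor
  · intro hA
    split_ifs at hA with hset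
    rw [not_not] at hset
    rw [loopA_iff] at hA
    have hpar := periodic_parity l hA
    refine ⟨?_, hpar⟩
    intro hab
    have hall : ∀ x ∈ PySem.Set.ofList l, x = a := by
      intro x hx
      rw [PySem.Set.mem_ofList] at hx
      obtain ⟨k, hk, rfl⟩ := List.mem_iff_getElem.mp hx
      rw [← List.getD_eq_getElem l "" hk, hpar k hk]
      rcases Nat.even_or_odd k with he | ho
      · simp [Nat.even_iff.mp he, hadef]
      · simp only [Nat.odd_iff.mp ho]
        rw [hab, hbdef]
    have := set_card_one _ a (PySem.Set.nodup_ofList l) hall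
    omega
  · rintro ⟨hab, hpar⟩
    have hset : (PySem.Set.ofList l).length = 2 := by
      apply set_card_two _ a b (PySem.Set.nodup_ofList l)
      · rw [PySem.Set.mem_ofList, hadef, List.getD_eq_getElem l "" h0]
        exact List.getElem_mem h0
      · rw [PySem.Set.mem_ofList, hbdef, List.getD_eq_getElem l "" h1]
        exact List.getElem_mem h1
      · exact hab
      · intro x hx
        rw [PySem.Set.mem_ofList] at hx
        obtain ⟨k, hk, rfl⟩ := List.mem_iff_getElem.mp hx
        rw [← List.getD_eq_getElem l "" hk, hpar k hk]
        rcases Nat.even_or_odd k with he | ho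
        · simp [Nat.even_iff.mp he, hadef]
        · simp [Nat.odd_iff.mp ho, hbdef]
    simp only [hset]
    rw [if_neg (by omega), loopA_iff]
    intro k hk
    rw [hpar k (by omega), hpar (k + 2) hk]
    have : (k + 2) % 2 = k % 2 := by omega
    rw [this]

-- B, characterised the same way
lemma B_iff (l : List String) (h4 : ¬ l.length < 4) :
    is_ping_pong_py_alt l = true ↔
      (l.getD 0 "" ≠ l.getD 1 "" ∧ ∀ k : Nat, k < l.length → l.getD k "" = l.getD (k % 2) "") := by
  obtain ⟨x, y, u, rfl⟩ : ∃ x y u, l = x :: y :: u := by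
    match l with
    | [] => simp at h4
    | [_] => simp at h4
    | x :: y :: u => exact ⟨x, y, u, rfl⟩
  unfold is_ping_pong_py_alt
  rw [slice0, slice1]
  simp only [Option.getD_some, List.tail_cons, Bool.and_eq_true, decide_eq_true_eq,
    beq_iff_eq, Bool.not_eq_true', PySem.Set.len]
  have hgetT : ∀ k : Nat, (y :: u).getD k "" = (x :: y :: u).getD (k + 1) "" := by
    intro k; simp [List.getD]
  have hg0 : (x :: y :: u).getD 0 "" = x := rfl
  have hg1 : (x :: y :: u).getD 1 "" = y := rfl
  have haE : x ∈ pvEvens (x :: y :: u) := by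
    rw [mem_pvEvens]; exact ⟨0, by simp, rfl⟩
  have hbO : y ∈ pvEvens (y :: u) := by
    rw [mem_pvEvens]; exact ⟨0, by simp, rfl⟩
  have hEiff : (((PySem.Set.ofList (pvEvens (x :: y :: u))).length : Int) = 1)
      ↔ ∀ j : Nat, 2 * j < (x :: y :: u).length → (x :: y :: u).getD (2 * j) "" = x := by
    rw [show (((PySem.Set.ofList (pvEvens (x :: y :: u))).length : Int) = 1)
        ↔ ((PySem.Set.ofList (pvEvens (x :: y :: u))).length = 1) by omega]
    rw [set_one_iff _ x haE]
    constructor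
    · intro h j hj
      exact h _ ((mem_pvEvens _ _).mpr ⟨j, hj, rfl⟩)
    · intro h v hv
      obtain ⟨j, hj, rfl⟩ := (mem_pvEvens _ v).mp hv
      exact h j hj
  have hOiff : (((PySem.Set.ofList (pvEvens (y :: u))).length : Int) = 1)
      ↔ ∀ j : Nat, 2 * j + 1 < (x :: y :: u).length → (x :: y :: u).getD (2 * j + 1) "" = y := by
    rw [show (((PySem.Set.ofList (pvEvens (y :: u))).length : Int) = 1)
        ↔ ((PySem.Set.ofList (pvEvens (y :: u))).length = 1) by omega]
    rw [set_one_iff _ y hbO]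
    constructor
    · intro h j hj
      rw [← hgetT]
      exact h _ ((mem_pvEvens _ _).mpr ⟨j, by simp at hj ⊢; omega, rfl⟩)
    · intro h v hv
      obtain ⟨j, hj, rfl⟩ := (mem_pvEvens _ v).mp hv
      rw [hgetT]
      exact h j (by simp at hj ⊢; omega)
  have hsetE_of : (∀ j : Nat, 2 * j < (x :: y :: u).length → (x :: y :: u).getD (2 * j) "" = x) →
      PySem.Set.ofList (pvEvens (x :: y :: u)) = [x] := by
    intro hEa
    apply nodup_mem_singleton _ _ (PySem.Set.nodup_ofList _)
    intro v
    rw [PySem.Set.mem_ofList]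
    constructor
    · intro hv
      obtain ⟨j, hj, rfl⟩ := (mem_pvEvens _ v).mp hv
      exact hEa j hj
    · rintro rfl; exact haE
  have hsetO_of : (∀ j : Nat, 2 * j + 1 < (x :: y :: u).length → (x :: y :: u).getD (2 * j + 1) "" = y) →
      PySem.Set.ofList (pvEvens (y :: u)) = [y] := by
    intro hOb
    apply nodup_mem_singleton _ _ (PySem.Set.nodup_ofList _)
    intro v
    rw [PySem.Set.mem_ofList]
    constructor
    · intro hv
      obtain ⟨j, hj, rfl⟩ := (mem_pvEvens _ v).mp hv
      rw [hgetT]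
      exact hOb j (by simp at hj ⊢; omega)
    · rintro rfl; exact hbO
  rw [hg0, hg1]
  constructor
  · rintro ⟨⟨⟨hlen, hE⟩, hO⟩, hne⟩
    have hEa := hEiff.mp hE
    have hOb := hOiff.mp hO
    have hab : x ≠ y := by
      intro he
      rw [hsetE_of hEa, hsetO_of hOb, he] at hne
      simp [PySem.Set.equal, PySem.Set.issubset, PySem.Set.contains] at hne
    refine ⟨hab, ?_⟩
    intro k hk
    rcases Nat.even_or_odd k with he | ho
    · have hk2 := Nat.even_iff.mp he
      obtain ⟨j, rfl⟩ : ∃ j, k = 2 * j := ⟨k / 2, by omega⟩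
      rw [hEa j hk]
      simp [Nat.mul_mod_right]
    · have hk2 := Nat.odd_iff.mp ho
      obtain ⟨j, rfl⟩ : ∃ j, k = 2 * j + 1 := ⟨k / 2, by omega⟩
      rw [hOb j hk]
      have hm1 : (2 * j + 1) % 2 = 1 := by omega
      rw [hm1, hg1]
  · rintro ⟨hab, hpar⟩
    have hEa : ∀ j : Nat, 2 * j < (x :: y :: u).length → (x :: y :: u).getD (2 * j) "" = x := by
      intro j hj
      rw [hpar _ hj]
      simp [Nat.mul_mod_right]
    have hOb : ∀ j : Nat, 2 * j + 1 < (x :: y :: u).length → (x :: y :: u).getD (2 * j + 1) "" = y := by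
      intro j hj
      rw [hpar _ hj]
      have hm1 : (2 * j + 1) % 2 = 1 := by omega
      rw [hm1, hg1]
    refine ⟨⟨⟨by simp at h4 ⊢; omega, hEiff.mpr hEa⟩, hOiff.mpr hOb⟩, ?_⟩
    rw [hsetE_of hEa, hsetO_of hOb]
    simp [PySem.Set.equal, PySem.Set.issubset, PySem.Set.contains]
    exact fun h => absurd h hab

lemma main_eq (l : List String) : is_ping_pong_py l = is_ping_pong_py_alt l := by
  by_cases h4 : l.length < 4
  · have hA : is_ping_pong_py l = false := by
      unfold is_ping_pong_py; simp [h4]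
    have hB : is_ping_pong_py_alt l = false := by
      unfold is_ping_pong_py_alt
      simp [show ¬ (4 ≤ l.length) by omega]
    rw [hA, hB]
  · rw [Bool.eq_iff_iff, A_iff l h4, B_iff l h4]

-- ===== VERDICT (by name: the statement is the Claim_ definition above) =====
theorem is_ping_pong_py_spec : Claim_equal_is_ping_pong_py := by
  intro senders _
  unfold Spec_is_ping_pong_py
  exact main_eq senders
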